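-- pv_equiv track=rewrite | github.com/mandy132002/pracs | fm.py | count_0s
-- ===== SOURCE A (Python) =====
-- def count_0s(x):
--     final_out,temp_out = 0,0
--     out=False
--
--     for ch in x[::-1]:
--         if ch=='1':
--             out=True
--             break
--
--         temp_out+=1
--
--     if out:
--         final_out=temp_out
--     return final_out
-- ===== SOURCE B (Python) =====
-- def count_0s(x):
--     # Single LEFT-TO-RIGHT pass: `run` is the length of the current run of
--     # non-'1' characters (reset at each '1'); at the end it equals the number
--     # of characters after the last '1'. `seen` records whether any '1' occurred.
--     run, seen = 0, False
--     for ch in x: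
--         if ch == '1':
--             run, seen = 0, True
--         else:
--             run += 1
--     return run if seen else 0
-- ===== Notes on version B (the rewrite author's own statement) =====
-- stated objective: alternative
-- what changed: Replaces A's reversed scan with break-and-flag by a single forward pass maintaining a run-length accumulator that resets at every '1', so the final run is the trailing segment length; no reversal and no early exit.
import Mathlib
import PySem

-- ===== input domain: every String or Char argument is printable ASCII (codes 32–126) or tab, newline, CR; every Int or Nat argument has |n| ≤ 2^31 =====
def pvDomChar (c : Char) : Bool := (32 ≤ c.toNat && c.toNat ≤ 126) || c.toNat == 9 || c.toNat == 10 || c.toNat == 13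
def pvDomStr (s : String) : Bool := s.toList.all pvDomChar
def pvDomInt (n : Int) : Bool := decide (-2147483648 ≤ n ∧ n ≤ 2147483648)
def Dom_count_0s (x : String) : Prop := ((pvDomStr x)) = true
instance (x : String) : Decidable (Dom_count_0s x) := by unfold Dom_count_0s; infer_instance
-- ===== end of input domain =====

-- B replaces A's reversed scan-with-break by a forward pass with a run-length accumulator that resets at each '1' (alternative decomposition, same cost).


-- ===== PORT A =====
-- the for-loop with break over x[::-1]: returns (temp_out, out)
def count0sLoop : List Char → Int → Int × Bool
  | [], temp => (temp, false)
  | c :: rest, temp => if c = '1' then (temp, true) else count0sLoop rest (temp + 1)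

def count_0s (x : String) : Int :=
  -- x[::-1] on a string is its reverse
  let p := count0sLoop x.toList.reverse 0
  if p.2 then p.1 else 0

-- ===== PORT B =====
-- forward pass: state (run, seen); run resets at '1', otherwise increments
def count_0s_alt (x : String) : Int :=
  let p := x.toList.foldl
    (fun (s : Int × Bool) c => if c = '1' then (0, true) else (s.1 + 1, s.2)) (0, false)
  if p.2 then p.1 else 0

-- ===== PRECONDITION & SPEC =====
def Spec_count_0s (x : String) (out : Int) : Prop := out = count_0s_alt x
instance (x : String) (out : Int) : Decidable (Spec_count_0s x out) := by unfold Spec_count_0s; infer_instance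

-- ===== CLAIM (what is proved, stated in full; the proofs are below) =====
def Claim_equal_count_0s : Prop := ∀ (x : String), Dom_count_0s x → Spec_count_0s x (count_0s x)

-- ===== LEMMAS AND PROOFS =====

-- A's loop counts the prefix of its input before the first '1'
lemma count0sLoop_eq (l : List Char) : ∀ t : Int,
    count0sLoop l t = (t + ((l.takeWhile (fun c => c ≠ '1')).length : Int), decide ('1' ∈ l)) := by
  induction l with
  | nil => intro t; simp [count0sLoop]
  | cons c rest ih =>
    intro t
    by_cases hc : c = '1'
    · subst hc; simp [count0sLoop, List.takeWhile]
    · have hc' : ¬ ('1' = c) := fun h => hc h.symm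
      simp [count0sLoop, hc, hc', List.takeWhile, ih (t + 1)]
      ring

-- B's fold yields (length of the '1'-free suffix, whether a '1' occurs)
lemma count0sFold_eq (l : List Char) :
    l.foldl (fun (s : Int × Bool) c => if c = '1' then (0, true) else (s.1 + 1, s.2)) (0, false)
      = (((l.reverse.takeWhile (fun c => c ≠ '1')).length : Int), decide ('1' ∈ l)) := by
  induction l using List.reverseRecOn with
  | nil => simp
  | append_singleton l c ih =>
    rw [List.foldl_append, ih]
    by_cases hc : c = '1'
    · subst hc; simp
    · have hc' : ¬ ('1' = c) := fun h => hc h.symm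
      simp [hc, hc']

-- ===== VERDICT (by name: the statement is the Claim_ definition above) =====
theorem count_0s_spec : Claim_equal_count_0s := by
  intro x _
  unfold Spec_count_0s count_0s count_0s_alt
  rw [count0sLoop_eq, count0sFold_eq]
  simp
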